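-- pv_equiv track=rewrite | github.com/MaximeTouze/ConferenceHelper | app.py | MoveDownValues
-- ===== SOURCE A (Python) =====
-- def MoveDownValues(sentences_rank_result, sentences_count_result, count_result_rank):
--     if (count_result_rank < 1):
--         return (sentences_rank_result, sentences_count_result)
--     else :
--         (new_sentences_rank_result, new_sentences_count_result) = MoveDownValues(sentences_rank_result, sentences_count_result, count_result_rank-1)
--         new_sentences_rank_result[count_result_rank-1] = new_sentences_rank_result[count_result_rank]
--         new_sentences_count_result[count_result_rank-1] = new_sentences_count_result[count_result_rank]
--         return (new_sentences_rank_result, new_sentences_count_result)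
-- ===== SOURCE B (Python) =====
-- def MoveDownValues(sentences_rank_result, sentences_count_result, count_result_rank):
--     for i in range(count_result_rank):
--         sentences_rank_result[i] = sentences_rank_result[i + 1]
--         sentences_count_result[i] = sentences_count_result[i + 1]
--     return (sentences_rank_result, sentences_count_result)
-- ===== Notes on version B (the rewrite author's own statement) =====
-- stated objective: simpler
-- what changed: Replaces the recursion (one stack frame per shifted slot) with a single ascending for-loop that shifts both lists in place.
import Mathlib
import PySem

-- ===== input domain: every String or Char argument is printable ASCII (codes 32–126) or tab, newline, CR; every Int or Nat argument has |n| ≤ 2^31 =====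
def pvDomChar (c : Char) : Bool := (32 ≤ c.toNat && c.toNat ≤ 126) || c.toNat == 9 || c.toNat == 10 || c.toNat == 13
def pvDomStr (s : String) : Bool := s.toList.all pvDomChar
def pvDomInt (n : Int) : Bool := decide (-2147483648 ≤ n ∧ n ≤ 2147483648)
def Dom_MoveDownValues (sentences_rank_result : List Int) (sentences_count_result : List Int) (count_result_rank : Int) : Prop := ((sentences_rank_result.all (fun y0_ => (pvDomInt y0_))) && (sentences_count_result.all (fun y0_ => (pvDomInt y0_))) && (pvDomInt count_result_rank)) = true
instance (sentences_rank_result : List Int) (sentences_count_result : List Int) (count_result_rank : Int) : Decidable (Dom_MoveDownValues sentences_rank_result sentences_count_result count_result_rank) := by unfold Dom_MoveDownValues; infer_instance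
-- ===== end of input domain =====

-- B replaces A's recursion (one stack frame per shifted slot) by a single ascending in-place
-- for-loop: simpler, O(1) stack. Both A and B mutate the two passed lists in place in Python;
-- the equivalence proved here is about the returned value.

-- ===== PORT A =====
def MoveDownValues (sentences_rank_result : List Int) (sentences_count_result : List Int) (count_result_rank : Int) : List Int × List Int :=
  if count_result_rank < 1 then (sentences_rank_result, sentences_count_result)
  else
    match MoveDownValues sentences_rank_result sentences_count_result (count_result_rank - 1) with
    | (nr, nc) =>
      (PySem.List.pySetD nr (count_result_rank - 1) (PySem.List.pyGetD nr count_result_rank 0),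
       PySem.List.pySetD nc (count_result_rank - 1) (PySem.List.pyGetD nc count_result_rank 0))
termination_by count_result_rank.toNat
decreasing_by omega

-- ===== PORT B =====
def MoveDownValues_alt (sentences_rank_result : List Int) (sentences_count_result : List Int) (count_result_rank : Int) : List Int × List Int :=
  (PySem.List.pyRange 0 count_result_rank 1).foldl
    (fun p i =>
      (PySem.List.pySetD p.1 i (PySem.List.pyGetD p.1 (i + 1) 0),
       PySem.List.pySetD p.2 i (PySem.List.pyGetD p.2 (i + 1) 0)))
    (sentences_rank_result, sentences_count_result)

-- ===== PRECONDITION & SPEC =====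
-- Pre_ excludes exactly the inputs where Python A raises IndexError: count_result_rank ≥ 1
-- while some accessed index count_result_rank is out of range of either list.
def Pre_MoveDownValues (sentences_rank_result : List Int) (sentences_count_result : List Int) (count_result_rank : Int) : Prop :=
  count_result_rank < 1 ∨ (count_result_rank < (sentences_rank_result.length : Int) ∧ count_result_rank < (sentences_count_result.length : Int))
instance (sentences_rank_result : List Int) (sentences_count_result : List Int) (count_result_rank : Int) : Decidable (Pre_MoveDownValues sentences_rank_result sentences_count_result count_result_rank) := by unfold Pre_MoveDownValues; infer_instance
def pvWitness_MoveDownValues : List Int × List Int × Int := ([3, 1, 4], [5, 9, 2], 2)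

def Spec_MoveDownValues (sentences_rank_result : List Int) (sentences_count_result : List Int) (count_result_rank : Int) (out : List Int × List Int) : Prop := out = MoveDownValues_alt sentences_rank_result sentences_count_result count_result_rank
instance (sentences_rank_result : List Int) (sentences_count_result : List Int) (count_result_rank : Int) (out : List Int × List Int) : Decidable (Spec_MoveDownValues sentences_rank_result sentences_count_result count_result_rank out) := by unfold Spec_MoveDownValues; infer_instance

-- ===== CLAIM (what is proved, stated in full; the proofs are below) =====
def Claim_equal_MoveDownValues : Prop := ∀ (sentences_rank_result : List Int) (sentences_count_result : List Int) (count_result_rank : Int), Dom_MoveDownValues sentences_rank_result sentences_count_result count_result_rank → Pre_MoveDownValues sentences_rank_result sentences_count_result count_result_rank → Spec_MoveDownValues sentences_rank_result sentences_count_result count_result_rank (MoveDownValues sentences_rank_result sentences_count_result count_result_rank)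

-- ===== LEMMAS AND PROOFS =====

-- B's loop, peeled at its last iteration.
theorem alt_step (r c : List Int) (k : Int) (h : 1 ≤ k) :
    MoveDownValues_alt r c k =
      let p := MoveDownValues_alt r c (k - 1)
      (PySem.List.pySetD p.1 (k - 1) (PySem.List.pyGetD p.1 k 0),
       PySem.List.pySetD p.2 (k - 1) (PySem.List.pyGetD p.2 k 0)) := by
  have hr := PySem.List.pyRange_one_succ_right (a := 0) (b := k - 1) (by omega)
  rw [show k - 1 + 1 = k by ring] at hr
  simp only [MoveDownValues_alt, hr, List.foldl_append, List.foldl_cons, List.foldl_nil,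
    show k - 1 + 1 = k by ring]

-- The recursion of A and the loop of B perform the same ascending sequence of assignments.
theorem MoveDownValues_eq_alt (n : Nat) : ∀ (r c : List Int) (k : Int), k.toNat = n →
    MoveDownValues r c k = MoveDownValues_alt r c k := by
  induction n with
  | zero =>
    intro r c k hk
    have h1 : k < 1 := by omega
    rw [MoveDownValues, if_pos h1, MoveDownValues_alt,
      PySem.List.pyRange_one_eq_nil (by omega : k ≤ 0), List.foldl_nil]
  | succ n ih =>
    intro r c k hk
    have h1 : ¬ k < 1 := by omega
    rw [MoveDownValues, if_neg h1, ih r c (k - 1) (by omega), alt_step r c k (by omega)]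

-- ===== VERDICT (by name: the statement is the Claim_ definition above) =====
theorem MoveDownValues_spec : Claim_equal_MoveDownValues := by
  intro r c k _ _
  exact MoveDownValues_eq_alt k.toNat r c k rfl
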